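-- pv_equiv track=rewrite | github.com/RyoSpiralArchitect/ZOCR | zocr/consensus/components.py | _rle_runs
-- ===== SOURCE A (Python) =====
-- from collections.abc import Sequence
--
-- def _rle_runs(binary: Sequence[Sequence[int]]):
--     """Yield run-length encoded spans for each row of ``binary``."""
--
--     H = len(binary)
--     runs_by_row = []
--     for y in range(H):
--         row = binary[y]
--         width = len(row)
--         runs = []
--         in_run = False
--         start = 0
--         for x in range(width):
--             v = row[x]
--             if v and not in_run:
--                 in_run = True
--                 start = x
--             elif (not v) and in_run:
--                 runs.append((start, x))
--                 in_run = False
--         if in_run: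
--             runs.append((start, width))
--         runs_by_row.append(runs)
--     return runs_by_row
-- ===== SOURCE B (Python) =====
-- def _rle_runs(binary):
--     """Yield run-length encoded spans for each row of ``binary``."""
--     runs_by_row = []
--     for row in binary:
--         runs = []
--         i = 0
--         n = len(row)
--         while i < n:
--             if row[i]:
--                 j = i + 1
--                 while j < n and row[j]:
--                     j += 1
--                 runs.append((i, j))
--                 i = j
--             else:
--                 i += 1
--         runs_by_row.append(runs)
--     return runs_by_row
-- ===== Notes on version B (the rewrite author's own statement) =====
-- stated objective: alternative
-- what changed: Replaces the per-cell in_run/start state machine with a two-pointer skip-scan: the outer pointer finds the start of each truthy run, an inner pointer consumes the whole run, and the span is emitted in one step with no boolean state or trailing-run closure.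
import Mathlib
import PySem

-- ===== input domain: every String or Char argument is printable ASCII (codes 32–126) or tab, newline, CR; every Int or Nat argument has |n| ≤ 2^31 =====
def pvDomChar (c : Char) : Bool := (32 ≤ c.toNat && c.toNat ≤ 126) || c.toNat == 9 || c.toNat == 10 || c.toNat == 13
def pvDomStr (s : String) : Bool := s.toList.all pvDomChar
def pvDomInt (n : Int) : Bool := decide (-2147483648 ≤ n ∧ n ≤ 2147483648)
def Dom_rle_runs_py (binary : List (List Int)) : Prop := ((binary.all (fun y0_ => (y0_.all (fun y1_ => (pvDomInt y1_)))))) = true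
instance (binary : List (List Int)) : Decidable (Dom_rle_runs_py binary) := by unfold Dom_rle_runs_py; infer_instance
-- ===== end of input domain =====

-- B replaces A's per-cell in_run/start state machine by a two-pointer skip-scan
-- (find the start of a truthy run, consume the whole run, emit the span at once);
-- same cost, no boolean state and no trailing-run closure step.

-- ===== PORT A =====
-- literal transliteration of A: outer loop over range(H), inner loop over range(width)
-- carrying the state (runs, in_run, start), then the trailing-run closure.
def rle_runs_py (binary : List (List Int)) : List (List (Int × Int)) :=
  let H : Int := binary.length
  (PySem.List.pyRange 0 H 1).foldl (fun runs_by_row y =>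
    let row := PySem.List.pyGetD binary y []   -- index y ∈ range(H): always in range
    let width : Int := row.length
    let st := (PySem.List.pyRange 0 width 1).foldl
      (fun (st : List (Int × Int) × Bool × Int) x =>
        let v := PySem.List.pyGetD row x 0     -- index x ∈ range(width): always in range
        if v ≠ 0 ∧ st.2.1 = false then (st.1, true, x)
        else if v = 0 ∧ st.2.1 = true then (st.1 ++ [(st.2.2, x)], false, st.2.2)
        else st) ([], false, 0)
    let runs := if st.2.1 then st.1 ++ [(st.2.2, width)] else st.1
    runs_by_row ++ [runs]) []

-- ===== PORT B =====
-- inner while loop of B: j consumes the rest of a truthy run, returning the exclusive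
-- end index and the unconsumed suffix of the row.
def pvConsume (l : List Int) (j : Int) : Int × List Int :=
  match l with
  | [] => (j, [])
  | v :: rest => if v ≠ 0 then pvConsume rest (j + 1) else (j, v :: rest)

theorem pvConsume_len (l : List Int) (j : Int) : (pvConsume l j).2.length ≤ l.length := by
  induction l generalizing j with
  | nil => simp [pvConsume]
  | cons v rest ih =>
    simp only [pvConsume]
    split
    · exact le_trans (ih (j + 1)) (Nat.le_succ _)
    · simp

-- outer while loop of B over one row: i is the current column index.
def pvRowRuns (l : List Int) (i : Int) : List (Int × Int) :=
  match l with
  | [] => []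
  | v :: rest =>
    if v ≠ 0 then
      let p := pvConsume rest (i + 1)
      (i, p.1) :: pvRowRuns p.2 p.1
    else pvRowRuns rest (i + 1)
termination_by l.length
decreasing_by
  · exact Nat.lt_succ_of_le (pvConsume_len rest (i + 1))
  · simp

def rle_runs_py_alt (binary : List (List Int)) : List (List (Int × Int)) :=
  binary.map (fun row => pvRowRuns row 0)

-- ===== PRECONDITION & SPEC =====
def Spec_rle_runs_py (binary : List (List Int)) (out : List (List (Int × Int))) : Prop := out = rle_runs_py_alt binary
instance (binary : List (List Int)) (out : List (List (Int × Int))) : Decidable (Spec_rle_runs_py binary out) := by unfold Spec_rle_runs_py; infer_instance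

-- ===== CLAIM (what is proved, stated in full; the proofs are below) =====
def Claim_equal_rle_runs_py : Prop := ∀ (binary : List (List Int)), Dom_rle_runs_py binary → Spec_rle_runs_py binary (rle_runs_py binary)

-- ===== LEMMAS AND PROOFS =====

-- A's inner step function, as a named function of the state and the (index, value) pair.
def pvStepA (st : List (Int × Int) × Bool × Int) (p : Int × Int) : List (Int × Int) × Bool × Int :=
  if p.2 ≠ 0 ∧ st.2.1 = false then (st.1, true, p.1)
  else if p.2 = 0 ∧ st.2.1 = true then (st.1 ++ [(st.2.2, p.1)], false, st.2.2)
  else st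

-- A's trailing-run closure at the exclusive end index w.
def pvCloseA (w : Int) (st : List (Int × Int) × Bool × Int) : List (Int × Int) :=
  if st.2.1 then st.1 ++ [(st.2.2, w)] else st.1

-- Invariant of A's state machine against B's skip-scan, for both values of in_run.
theorem pvFold_rowRuns (l : List Int) :
    ∀ (s : Int) (runs : List (Int × Int)) (start : Int),
      pvCloseA (s + l.length) ((PySem.List.enumerate l s).foldl pvStepA (runs, false, start))
        = runs ++ pvRowRuns l s
      ∧ pvCloseA (s + l.length) ((PySem.List.enumerate l s).foldl pvStepA (runs, true, start))
        = runs ++ (start, (pvConsume l s).1) :: pvRowRuns (pvConsume l s).2 (pvConsume l s).1 := by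
  induction l with
  | nil =>
    intro s runs start
    simp [PySem.List.enumerate_nil, pvCloseA, pvRowRuns, pvConsume]
  | cons v rest ih =>
    intro s runs start
    have hlen : s + ((v :: rest).length : Int) = (s + 1) + (rest.length : Int) := by
      simp; ring
    by_cases hv : v = 0
    · constructor
      · rw [PySem.List.enumerate_cons, List.foldl_cons]
        have hstep : pvStepA (runs, false, start) (s, v) = (runs, false, start) := by
          simp [pvStepA, hv]
        rw [hstep, hlen, (ih (s + 1) runs start).1]
        simp [pvRowRuns, hv]
      · rw [PySem.List.enumerate_cons, List.foldl_cons]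
        have hstep : pvStepA (runs, true, start) (s, v) = (runs ++ [(start, s)], false, start) := by
          simp [pvStepA, hv]
        rw [hstep, hlen, (ih (s + 1) (runs ++ [(start, s)]) start).1]
        simp [pvConsume, hv, pvRowRuns]
    · constructor
      · rw [PySem.List.enumerate_cons, List.foldl_cons]
        have hstep : pvStepA (runs, false, start) (s, v) = (runs, true, s) := by
          simp [pvStepA, hv]
        rw [hstep, hlen, (ih (s + 1) runs s).2]
        simp [pvRowRuns, hv]
      · rw [PySem.List.enumerate_cons, List.foldl_cons]
        have hstep : pvStepA (runs, true, start) (s, v) = (runs, true, start) := by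
          simp [pvStepA, hv]
        rw [hstep, hlen, (ih (s + 1) runs start).2]
        simp [pvConsume, hv]

-- A's inner loop plus closure on one row equals B's skip-scan on that row.
theorem pvRowA_eq (row : List Int) :
    pvCloseA (row.length : Int)
      ((PySem.List.pyRange 0 (row.length : Int) 1).foldl
        (fun (st : List (Int × Int) × Bool × Int) x =>
          let v := PySem.List.pyGetD row x 0
          if v ≠ 0 ∧ st.2.1 = false then (st.1, true, x)
          else if v = 0 ∧ st.2.1 = true then (st.1 ++ [(st.2.2, x)], false, st.2.2)
          else st) ([], false, 0))
      = pvRowRuns row 0 := by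
  have henum := PySem.List.enumerate_eq_map_pyRange (xs := row) (d := 0)
  have hfold : (PySem.List.pyRange 0 (row.length : Int) 1).foldl
      (fun (st : List (Int × Int) × Bool × Int) x =>
        let v := PySem.List.pyGetD row x 0
        if v ≠ 0 ∧ st.2.1 = false then (st.1, true, x)
        else if v = 0 ∧ st.2.1 = true then (st.1 ++ [(st.2.2, x)], false, st.2.2)
        else st) ([], false, 0)
      = (PySem.List.enumerate row 0).foldl pvStepA ([], false, 0) := by
    rw [henum, List.foldl_map]
    simp [pvStepA, PySem.List.len]
  rw [hfold]
  have h := (pvFold_rowRuns row 0 [] 0).1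
  simpa using h

-- ===== VERDICT (by name: the statement is the Claim_ definition above) =====
theorem rle_runs_py_spec : Claim_equal_rle_runs_py := by
  intro binary _
  unfold Spec_rle_runs_py rle_runs_py rle_runs_py_alt
  dsimp only
  rw [show ((binary.length : Int)) = PySem.List.len binary from rfl,
      PySem.List.foldl_pyRange_zero_pyGetD binary ([] : List Int)
        (fun acc row => acc ++
          [if ((PySem.List.pyRange 0 (row.length : Int) 1).foldl
                (fun (st : List (Int × Int) × Bool × Int) x =>
                  let v := PySem.List.pyGetD row x 0
                  if v ≠ 0 ∧ st.2.1 = false then (st.1, true, x)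
                  else if v = 0 ∧ st.2.1 = true then (st.1 ++ [(st.2.2, x)], false, st.2.2)
                  else st) ([], false, 0)).2.1 = true
           then ((PySem.List.pyRange 0 (row.length : Int) 1).foldl
                (fun (st : List (Int × Int) × Bool × Int) x =>
                  let v := PySem.List.pyGetD row x 0
                  if v ≠ 0 ∧ st.2.1 = false then (st.1, true, x)
                  else if v = 0 ∧ st.2.1 = true then (st.1 ++ [(st.2.2, x)], false, st.2.2)
                  else st) ([], false, 0)).1 ++
                [(((PySem.List.pyRange 0 (row.length : Int) 1).foldl
                (fun (st : List (Int × Int) × Bool × Int) x =>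
                  let v := PySem.List.pyGetD row x 0
                  if v ≠ 0 ∧ st.2.1 = false then (st.1, true, x)
                  else if v = 0 ∧ st.2.1 = true then (st.1 ++ [(st.2.2, x)], false, st.2.2)
                  else st) ([], false, 0)).2.2, (row.length : Int))]
           else ((PySem.List.pyRange 0 (row.length : Int) 1).foldl
                (fun (st : List (Int × Int) × Bool × Int) x =>
                  let v := PySem.List.pyGetD row x 0
                  if v ≠ 0 ∧ st.2.1 = false then (st.1, true, x)
                  else if v = 0 ∧ st.2.1 = true then (st.1 ++ [(st.2.2, x)], false, st.2.2)
                  else st) ([], false, 0)).1]) [],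
      PySem.List.foldl_append_singleton_eq_map]
  exact List.map_congr_left (fun row _ => by simpa [pvCloseA] using pvRowA_eq row)
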